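-- pv_equiv track=rewrite | github.com/ovimura/LeetCode | py/sol/P2639-FindTheWidthOfColumnsOfAGrid.py | findColumnWidth
-- ===== SOURCE A (Python) =====
-- from typing import List
--
-- def findColumnWidth(grid: List[List[int]]) -> List[int]:
--     widths = []
--     for j in range(len(grid[0])):
--         cols = []
--         for i in range(len(grid)):
--             cols.append(grid[i][j])
--         m1 = max(cols)
--         m2 = min(cols)
--         w1 = (len(str(m1)))
--         w2 = (len(str(m2)))
--         widths.append((max(w1, w2)))
--     return widths
-- ===== SOURCE B (Python) =====
-- def findColumnWidth(grid):
--     # per column, take the max display width directly (no numeric min/max)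
--     return [max(len(str(row[j])) for row in grid) for j in range(len(grid[0]))]
-- ===== Notes on version B (the rewrite author's own statement) =====
-- stated objective: simpler
-- what changed: B drops A's per-column list build and numeric min/max-plus-two-str-conversions; it takes the maximum of len(str(cell)) directly over each column in a comprehension.
import Mathlib
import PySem

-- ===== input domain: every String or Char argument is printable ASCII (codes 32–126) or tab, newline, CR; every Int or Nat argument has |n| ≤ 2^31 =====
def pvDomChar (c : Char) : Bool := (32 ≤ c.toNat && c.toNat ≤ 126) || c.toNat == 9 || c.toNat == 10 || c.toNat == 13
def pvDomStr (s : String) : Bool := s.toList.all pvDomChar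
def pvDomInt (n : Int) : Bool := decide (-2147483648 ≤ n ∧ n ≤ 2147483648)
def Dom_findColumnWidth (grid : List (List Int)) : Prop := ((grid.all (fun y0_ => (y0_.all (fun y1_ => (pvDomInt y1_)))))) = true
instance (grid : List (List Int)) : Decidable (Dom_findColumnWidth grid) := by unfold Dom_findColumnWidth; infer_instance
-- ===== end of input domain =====

-- B replaces A's per-column list build + numeric min/max + two str() conversions by a direct
-- per-column maximum of len(str(cell)) (objective: simpler).


-- ===== PORT A =====
def findColumnWidth (grid : List (List Int)) : List Int :=
  (PySem.List.pyRange 0 (PySem.List.len (PySem.List.pyGetD grid 0 []))).foldl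
    (fun widths j =>
      let cols := (PySem.List.pyRange 0 (PySem.List.len grid)).foldl
        (fun cols i => cols ++ [PySem.List.pyGetD (PySem.List.pyGetD grid i []) j 0]) []
      let m1 := (PySem.List.max? cols (fun y => y)).getD 0
      let m2 := (PySem.List.min? cols (fun y => y)).getD 0
      let w1 := PySem.Str.len (PySem.Int.toStr m1)
      let w2 := PySem.Str.len (PySem.Int.toStr m2)
      widths ++ [max w1 w2]) []

-- ===== PORT B =====
def findColumnWidth_alt (grid : List (List Int)) : List Int :=
  (PySem.List.pyRange 0 (PySem.List.len (PySem.List.pyGetD grid 0 []))).map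
    (fun j =>
      (PySem.List.max? (grid.map (fun row => PySem.Str.len (PySem.Int.toStr (PySem.List.pyGetD row j 0))))
        (fun y => y)).getD 0)

-- ===== PRECONDITION & SPEC =====
-- Pre_ excludes exactly the inputs on which both Pythons raise IndexError: the empty grid
-- (grid[0]) and ragged grids where some row is shorter than row 0 (grid[i][j]).
def Pre_findColumnWidth (grid : List (List Int)) : Prop :=
  grid ≠ [] ∧ ∀ row ∈ grid, grid.headI.length ≤ row.length
instance (grid : List (List Int)) : Decidable (Pre_findColumnWidth grid) := by
  unfold Pre_findColumnWidth; infer_instance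
def pvWitness_findColumnWidth : List (List Int) := [[-10, 2], [3, 456]]
def Spec_findColumnWidth (grid : List (List Int)) (out : List Int) : Prop := out = findColumnWidth_alt grid
instance (grid : List (List Int)) (out : List Int) : Decidable (Spec_findColumnWidth grid out) := by unfold Spec_findColumnWidth; infer_instance

-- ===== CLAIM (what is proved, stated in full; the proofs are below) =====
def Claim_equal_findColumnWidth : Prop := ∀ (grid : List (List Int)), Dom_findColumnWidth grid → Pre_findColumnWidth grid → Spec_findColumnWidth grid (findColumnWidth grid)

-- ===== LEMMAS AND PROOFS =====

-- display width of an int, the value both ports compute with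
def pvL (n : Int) : Int := PySem.Str.len (PySem.Int.toStr n)

theorem pv_toDigitsCore_len (f : Nat) : ∀ (n : Nat) (ds : List Char), n < f →
    (Nat.toDigitsCore 10 f n ds).length = Nat.log 10 n + 1 + ds.length := by
  induction f with
  | zero => intro n ds h; omega
  | succ f ih =>
    intro n ds h
    rw [Nat.toDigitsCore]
    by_cases h10 : n / 10 = 0
    · have h9 : n < 10 := by omega
      simp [h10, Nat.log_eq_zero_iff.mpr (Or.inl h9)]
      omega
    · have hn : 10 ≤ n := by
        by_contra hc; exact h10 (Nat.div_eq_of_lt (by omega))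
      simp only [h10, if_false]
      rw [ih (n / 10) _ (by omega)]
      have := Nat.log_div_base 10 n
      have hlog : 1 ≤ Nat.log 10 n := Nat.log_pos (by norm_num) hn
      simp
      omega

theorem pvL_eq (n : Int) : pvL n =
    if n < 0 then (Nat.log 10 n.natAbs : Int) + 2 else (Nat.log 10 n.toNat : Int) + 1 := by
  unfold pvL
  rw [PySem.Str.len_eq, PySem.Int.toList_toStr, PySem.Int.toChars]
  by_cases h : n < 0
  · simp [h, Nat.toDigits, pv_toDigitsCore_len _ _ [] (Nat.lt_succ_self _)]
    omega
  · simp [h, Nat.toDigits, pv_toDigitsCore_len _ _ [] (Nat.lt_succ_self _)]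

-- quasiconvexity: a cell between the column min and max is never wider than both
theorem pvL_quasi (a x b : Int) (ha : a ≤ x) (hb : x ≤ b) : pvL x ≤ max (pvL a) (pvL b) := by
  rw [pvL_eq a, pvL_eq x, pvL_eq b]
  by_cases hx : x < 0
  · have haneg : a < 0 := by omega
    have habs : x.natAbs ≤ a.natAbs := by omega
    have := Nat.log_mono_right (b := 10) habs
    simp [hx, haneg]
    left; omega
  · have hbpos : ¬ b < 0 := by omega
    have habs : x.toNat ≤ b.toNat := by omega
    have := Nat.log_mono_right (b := 10) habs
    simp [hx, hbpos]
    right; omega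

-- per-column core: max width over the cells = max(width(max), width(min))
theorem pv_col (x : Int) (cs : List Int) :
    (cs.map pvL).foldl max (pvL x) = max (pvL (cs.foldl max x)) (pvL (cs.foldl min x)) := by
  have hboundM := PySem.List.le_foldl_max cs x
  have hboundm := PySem.List.foldl_min_le cs x
  have hup := PySem.List.le_foldl_max (cs.map pvL) (pvL x)
  apply le_antisymm
  · rcases PySem.List.foldl_max_mem (cs.map pvL) (pvL x) with h | h
    · rw [h]
      have := pvL_quasi (cs.foldl min x) x (cs.foldl max x) hboundm.1 hboundM.1
      omega
    · rcases List.mem_map.mp h with ⟨y, hy, hLy⟩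
      rw [← hLy]
      have := pvL_quasi (cs.foldl min x) y (cs.foldl max x) (hboundm.2 y hy) (hboundM.2 y hy)
      omega
  · have hMle : pvL (cs.foldl max x) ≤ (cs.map pvL).foldl max (pvL x) := by
      rcases PySem.List.foldl_max_mem cs x with h | h
      · rw [h]; exact hup.1
      · exact hup.2 _ (List.mem_map.mpr ⟨_, h, rfl⟩)
    have hmle : pvL (cs.foldl min x) ≤ (cs.map pvL).foldl max (pvL x) := by
      rcases PySem.List.foldl_min_mem cs x with h | h
      · rw [h]; exact hup.1
      · exact hup.2 _ (List.mem_map.mpr ⟨_, h, rfl⟩)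
    exact max_le hMle hmle

-- ===== VERDICT (by name: the statement is the Claim_ definition above) =====
theorem findColumnWidth_spec : Claim_equal_findColumnWidth := by
  intro grid _ hpre
  unfold Spec_findColumnWidth findColumnWidth findColumnWidth_alt
  obtain ⟨hne, -⟩ := hpre
  obtain ⟨r, t, rfl⟩ : ∃ r t, grid = r :: t := by
    cases grid with
    | nil => exact absurd rfl hne
    | cons r t => exact ⟨r, t, rfl⟩
  rw [PySem.List.foldl_append_singleton_eq_map]
  simp only [List.nil_append]
  apply List.map_congr_left
  intro j _
  rw [PySem.List.foldl_pyRange_zero_pyGetD (r :: t) ([] : List Int)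
        (fun cols row => cols ++ [PySem.List.pyGetD row j 0]) [],
      PySem.List.foldl_append_singleton_eq_map]
  simp only [List.nil_append, List.map_cons, PySem.List.max?_id_cons, PySem.List.min?_id_cons,
    Option.getD_some]
  have hmm : List.map (fun row => PySem.Str.len (PySem.Int.toStr (PySem.List.pyGetD row j 0))) t
      = List.map pvL (List.map (fun row => PySem.List.pyGetD row j 0) t) := by
    simp [pvL, List.map_map, Function.comp]
  rw [hmm]
  exact (pv_col (PySem.List.pyGetD r j 0) (t.map (fun row => PySem.List.pyGetD row j 0))).symm
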